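-- pv_equiv track=rewrite | github.com/karelchandra/Algorithm-and-DataStructure | assignment1-Non Comparison-Sort/assignment1.py | counting_sort_stable_str
-- ===== SOURCE A (Python) =====
-- def counting_sort_stable_str(nums,b,i):
--     """
--     This is where the sort of radix_sort, first
--     implement the count_array by multiplying by b,
--     then count the occurence of the character by finding
--     the ascii values of each character, create
--     a position pointer corresponding to the counter,
--     create a temporary array to store the sorted list,
--     the position here is use to update the characters
--     and store it  into the temporary array to be copied
--     back to the list.
--     Precondition: studio_list have at least 1 item
--     Big-O complexity: O(n+b) where here n is the len of
--     list and b is the base use to modularize the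
--     couting_sort.
--     Input: unsorted list (same num_rad_sort above as it is part of)
--     Output: sorted list (same num_rad_sort above as it is part of)
--     Precondition: studio_list have at least 1 item
--     """
--     # This function is reference from Course notes by Daniel ANDERSON/pg.29
--     # initialize count array
--     count_array = [0]*(b+1) # save space for " "
--
--     # loop through the elements of column
--     col_index = 0
--     for _ in range(len(nums)):
--         alpha = ord(nums[_][i]) - 96  # find the ascii corresponding value to the char
--         if alpha < 0:
--             col_index = (alpha // (b**i))+ 1 % b # if - value then traverse back to 0
--         else:
--             col_index = alpha + 1
--         count_array[col_index] += 1  # find occurence of character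
--
--     # initialize position array
--     position_array = [0]*(b+1)
--     position_array[0] = 1
--
--     # set the index
--     for _ in range(1,b+1):
--         position_array[_] = position_array[_ - 1] + count_array[_ - 1]
--
--     # initialize output array
--     output_array = [0]*(len(nums))
--
--     # swap the array based on count_array
--     for _ in range(len(nums)):
--         alpha = ord(nums[_][i]) - 96 # find the ascii corresponding
--         if alpha < 0:
--             col_index = (alpha // (b**i)) + 1 % b # if - value then traverse back to 0
--
--         else:
--             col_index = alpha + 1
--         output_array[position_array[col_index]-1] = nums[_] # update the array
--         position_array[col_index] += 1
--     # return the sorted list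
--     return output_array
-- ===== SOURCE B (Python) =====
-- def counting_sort_stable_str(nums, b, i):
--     """Bucket sort on character column i: one list of buckets instead of
--     count/position/output index arrays; same column-key formula as A."""
--     buckets = [[] for _ in range(b + 1)]
--     for s in nums:
--         alpha = ord(s[i]) - 96
--         if alpha < 0:
--             col_index = (alpha // (b ** i)) + 1 % b
--         else:
--             col_index = alpha + 1
--         buckets[col_index].append(s)
--     out = []
--     for bucket in buckets:
--         out += bucket
--     return out
-- ===== Notes on version B (the rewrite author's own statement) =====
-- stated objective: simpler
-- what changed: Replaces the count-array + prefix-sum position-pointer placement scheme with a plain stable bucket sort: one list of b+1 buckets filled in a single pass (same column-key formula) and concatenated in order, dropping the count pass, the prefix-sum pass and the indexed writes into a preallocated output.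
import Mathlib
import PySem

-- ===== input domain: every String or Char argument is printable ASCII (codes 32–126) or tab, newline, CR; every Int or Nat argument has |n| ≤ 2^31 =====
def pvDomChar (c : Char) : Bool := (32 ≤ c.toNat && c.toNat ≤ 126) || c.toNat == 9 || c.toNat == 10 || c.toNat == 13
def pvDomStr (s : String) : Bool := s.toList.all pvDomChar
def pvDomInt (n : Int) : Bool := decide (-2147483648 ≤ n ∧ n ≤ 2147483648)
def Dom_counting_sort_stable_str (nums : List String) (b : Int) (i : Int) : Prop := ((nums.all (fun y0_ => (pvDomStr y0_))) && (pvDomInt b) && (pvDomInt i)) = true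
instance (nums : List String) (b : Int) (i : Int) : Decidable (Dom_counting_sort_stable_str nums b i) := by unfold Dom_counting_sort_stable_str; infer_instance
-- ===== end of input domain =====

-- B replaces A's count-array/prefix-sum/position-pointer placement with a stable bucket sort
-- (same column-key formula, buckets concatenated in order); same cost, simpler structure.


-- ===== PORT A =====
-- col_index as BOTH Pythons compute it, line for line (shared helper: B's source contains the
-- identical branch).  'ord(s[i])' is PySem.Str.pyGet? (none = IndexError, excluded by Pre_;
-- the `.getD ' '` fallback is never reached under Pre_); 'b ** i' is b ^ i.toNat, exact since
-- Pre_ demands 0 ≤ i whenever this branch runs; '//' and '1 % b' are Python floordiv/mod.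
def pvColIndex (b i : Int) (s : String) : Int :=
  let alpha : Int := (((PySem.Str.pyGet? s i).getD ' ').toNat : Int) - 96
  if alpha < 0 then
    PySem.Int.floordiv alpha (b ^ i.toNat) + PySem.Int.mod 1 b
  else alpha + 1

-- Literal port of A: count pass, prefix-sum position pass, then indexed placement.
-- output_array = [0]*len(nums) holds int placeholders that Python overwrites before returning
-- (under Pre_); the placeholder is "" here.  pySetD/pyGetD keep Python's negative-index wrap.
def counting_sort_stable_str (nums : List String) (b : Int) (i : Int) : List String :=
  let count_array : List Int :=
    nums.foldl (fun ca s =>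
        PySem.List.pySetD ca (pvColIndex b i s)
          (PySem.List.pyGetD ca (pvColIndex b i s) 0 + 1))
      (List.replicate (b + 1).toNat 0)
  let position_array : List Int :=
    (PySem.List.pyRange 1 (b + 1) 1).foldl (fun pa j =>
        PySem.List.pySetD pa j
          (PySem.List.pyGetD pa (j - 1) 0 + PySem.List.pyGetD count_array (j - 1) 0))
      (PySem.List.pySetD (List.replicate (b + 1).toNat 0) 0 1)
  let res :=
    nums.foldl (fun st s =>
        let p := PySem.List.pyGetD st.2 (pvColIndex b i s) 0
        (PySem.List.pySetD st.1 (p - 1) s,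
         PySem.List.pySetD st.2 (pvColIndex b i s) (p + 1)))
      (List.replicate nums.length "", position_array)
  res.1

-- ===== PORT B =====
-- Literal port of B (Source B): fill b+1 buckets in one pass, then concatenate them.
def counting_sort_stable_str_alt (nums : List String) (b : Int) (i : Int) : List String :=
  let buckets : List (List String) :=
    nums.foldl (fun bs s =>
        PySem.List.pySetD bs (pvColIndex b i s)
          (PySem.List.pyGetD bs (pvColIndex b i s) [] ++ [s]))
      (List.replicate (b + 1).toNat [])
  buckets.foldl (fun out bucket => out ++ bucket) []

-- ===== PRECONDITION & SPEC =====
-- Per-element condition: the column character exists and the computed col_index is a valid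
-- (possibly negative, Python-wrapping) index into the b+1 count/bucket arrays; in the
-- alpha<0 branch Python additionally needs b ≠ 0 (for 1 % b) and 0 ≤ i (b**i is a float
-- otherwise).  This is exactly where Python A returns instead of raising.
def pvPreElem (b i : Int) (s : String) : Bool :=
  match PySem.Str.pyGet? s i with
  | none => false
  | some c =>
    let alpha : Int := (c.toNat : Int) - 96
    if alpha < 0 then
      !(b == 0) && decide (0 ≤ i) &&
        (decide (-(b + 1) ≤ PySem.Int.floordiv alpha (b ^ i.toNat) + PySem.Int.mod 1 b) &&
         decide (PySem.Int.floordiv alpha (b ^ i.toNat) + PySem.Int.mod 1 b < b + 1))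
    else decide (alpha + 1 < b + 1)

-- Pre_ holds exactly when Python A returns normally: b ≥ 0 (else the b+1-sized arrays raise)
-- and every string's column key is in range.
def Pre_counting_sort_stable_str (nums : List String) (b : Int) (i : Int) : Prop :=
  0 ≤ b ∧ ∀ s ∈ nums, pvPreElem b i s = true

instance (nums : List String) (b : Int) (i : Int) : Decidable (Pre_counting_sort_stable_str nums b i) := by
  unfold Pre_counting_sort_stable_str; infer_instance

def pvWitness_counting_sort_stable_str : List String × Int × Int := (["ba", "ab", "aa"], 3, 0)

def Spec_counting_sort_stable_str (nums : List String) (b : Int) (i : Int) (out : List String) : Prop := out = counting_sort_stable_str_alt nums b i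
instance (nums : List String) (b : Int) (i : Int) (out : List String) : Decidable (Spec_counting_sort_stable_str nums b i out) := by unfold Spec_counting_sort_stable_str; infer_instance

-- ===== CLAIM (what is proved, stated in full; the proofs are below) =====
def Claim_equal_counting_sort_stable_str : Prop := ∀ (nums : List String) (b : Int) (i : Int), Dom_counting_sort_stable_str nums b i → Pre_counting_sort_stable_str nums b i → Spec_counting_sort_stable_str nums b i (counting_sort_stable_str nums b i)

-- ===== LEMMAS AND PROOFS =====

-- Python's wrapped index for an in-range (possibly negative) index j into a length-n list.
def pvWrap (n : Nat) (j : Int) : Nat := if 0 ≤ j then j.toNat else n - (-j).toNat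

-- The (wrapped) bucket an element goes to.
def pvKey (b i : Int) (s : String) : Nat := pvWrap (b + 1).toNat (pvColIndex b i s)

def pvCnt (b i : Int) (l : List String) (j : Nat) : Nat := l.countP (fun s => pvKey b i s == j)

def pvFil (b i : Int) (l : List String) (j : Nat) : List String := l.filter (fun s => pvKey b i s == j)

-- slots taken by buckets below j during the placement loop (ds = already placed, rem = to do)
def pvStart (b i : Int) (ds : List (List String)) (rem : List String) (j : Nat) : Nat :=
  ((List.range j).map (fun l => (ds.getD l []).length + pvCnt b i rem l)).sum

-- the output array during the placement loop, as blocks: placed prefix ++ "" placeholders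
def pvBlocks (b i : Int) (ds : List (List String)) (rem : List String) : List String :=
  ((List.range ds.length).map (fun j => ds.getD j [] ++ List.replicate (pvCnt b i rem j) "")).flatten

lemma pvWrap_lt (n : Nat) (j : Int) (h1 : -(n : Int) ≤ j) (h2 : j < n) : pvWrap n j < n := by
  unfold pvWrap; split_ifs <;> omega

lemma pyGetD_wrap {α : Type} (xs : List α) (j : Int) (d : α)
    (h1 : -(xs.length : Int) ≤ j) (h2 : j < xs.length) :
    PySem.List.pyGetD xs j d = xs.getD (pvWrap xs.length j) d := by
  unfold PySem.List.pyGetD PySem.List.pyGet? PySem.List.pyIdx? pvWrap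
  by_cases h0 : 0 ≤ j
  · simp [h0, h2, List.getD_eq_getElem?_getD]
  · simp [h0, h1, List.getD_eq_getElem?_getD]

lemma pySetD_wrap {α : Type} (xs : List α) (j : Int) (v : α)
    (h1 : -(xs.length : Int) ≤ j) (h2 : j < xs.length) :
    PySem.List.pySetD xs j v = xs.set (pvWrap xs.length j) v := by
  unfold PySem.List.pySetD PySem.List.pySet? PySem.List.pyIdx? pvWrap
  by_cases h0 : 0 ≤ j
  · simp [h0, h2]
  · simp [h0, h1]

lemma map_getD_range {α : Type} (xs : List α) (d : α) :
    (List.range xs.length).map (fun j => xs.getD j d) = xs := by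
  apply List.ext_getElem (by simp)
  intro k h1 h2
  simp [List.getD_eq_getElem?_getD, List.getElem?_eq_getElem h2]


lemma getD_map_range {α : Type} (f : Nat → α) (n j : Nat) (d : α) (h : j < n) :
    ((List.range n).map f).getD j d = f j := by
  simp [List.getD_eq_getElem?_getD, List.getElem?_map, List.getElem?_range h]

lemma getD_replicate_any {α : Type} (n j : Nat) (a : α) :
    (List.replicate n a).getD j a = a := by
  simp only [List.getD_eq_getElem?_getD, List.getElem?_replicate]
  split <;> rfl

lemma flatten_map_replicate {α : Type} (c : Nat → Nat) (x : α) :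
    ∀ (l : List Nat), (l.map (fun j => List.replicate (c j) x)).flatten
      = List.replicate ((l.map c).sum) x := by
  intro l
  induction l with
  | nil => simp
  | cons a t ih =>
    simp only [List.map_cons, List.flatten_cons, List.sum_cons, ih]
    rw [← List.replicate_add]

lemma key_lt (b i : Int) (s : String) (h1 : -(b + 1) ≤ pvColIndex b i s)
    (h2 : pvColIndex b i s < b + 1) : pvKey b i s < (b + 1).toNat := by
  unfold pvKey
  exact pvWrap_lt _ _ (by omega) (by omega)

lemma sum_cnt (b i : Int) (nums : List String)
    (hk : ∀ s ∈ nums, pvKey b i s < (b + 1).toNat) :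
    ((List.range (b + 1).toNat).map (fun j => pvCnt b i nums j)).sum = nums.length := by
  induction nums with
  | nil => simp [pvCnt]
  | cons s t ih =>
    have hks : pvKey b i s < (b + 1).toNat := hk s (by simp)
    have ht := ih (fun x hx => hk x (by simp [hx]))
    simp only [pvCnt, List.countP_cons] at *
    have hsplit : ((List.range (b + 1).toNat).map
        (fun j => t.countP (fun x => pvKey b i x == j) + if (pvKey b i s == j) = true then 1 else 0)).sum
        = ((List.range (b + 1).toNat).map (fun j => t.countP (fun x => pvKey b i x == j))).sum
          + ((List.range (b + 1).toNat).map (fun j => if (pvKey b i s == j) = true then 1 else 0)).sum := by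
      rw [← List.sum_map_add]
    rw [hsplit, ht]
    have hcount : ((List.range (b + 1).toNat).map (fun j => if (pvKey b i s == j) = true then 1 else 0)).sum
        = (List.range (b + 1).toNat).countP (fun j => pvKey b i s == j) :=
      PySem.List.sum_map_ite_one_zero_nat _ _
    have : (List.range (b + 1).toNat).countP (fun j => pvKey b i s == j)
        = (List.range (b + 1).toNat).count (pvKey b i s) := by
      apply List.countP_congr
      intro j hj
      simp only [beq_iff_eq]; omega
    rw [hcount, this, List.count_range]
    rw [if_pos hks]
    simp

-- the update-at-key loop shared by A's count pass and B's bucket pass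
lemma foldUpd {α : Type} (b i : Int) (g : String → α → α) (d : α) :
    ∀ (l : List String) (bs : List α), bs.length = (b + 1).toNat →
    (∀ s ∈ l, -(b + 1) ≤ pvColIndex b i s ∧ pvColIndex b i s < b + 1) →
    l.foldl (fun a s =>
        PySem.List.pySetD a (pvColIndex b i s)
          (g s (PySem.List.pyGetD a (pvColIndex b i s) d))) bs
      = (List.range (b + 1).toNat).map
          (fun j => (pvFil b i l j).foldl (fun v s => g s v) (bs.getD j d)) := by
  intro l
  induction l with
  | nil =>
    intro bs hlen _
    simp only [List.foldl_nil, pvFil, List.filter_nil]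
    rw [← hlen]
    exact (map_getD_range bs d).symm
  | cons s t ih =>
    intro bs hlen hcol
    obtain ⟨h1, h2⟩ := hcol s (by simp)
    have hbpos : (0 : Int) < b + 1 := by omega
    have hblen : (bs.length : Int) = b + 1 := by rw [hlen]; omega
    have hk : pvKey b i s < (b + 1).toNat := key_lt b i s h1 h2
    simp only [List.foldl_cons]
    rw [pySetD_wrap bs _ _ (by omega) (by omega), pyGetD_wrap bs _ _ (by omega) (by omega)]
    have hwrap : pvWrap bs.length (pvColIndex b i s) = pvKey b i s := by
      unfold pvKey; rw [hlen]
    rw [hwrap]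
    rw [ih _ (by simp [hlen]) (fun x hx => hcol x (by simp [hx]))]
    apply List.map_congr_left
    intro j hj
    simp only [List.mem_range] at hj
    by_cases hjk : j = pvKey b i s
    · have hjlen : pvKey b i s < bs.length := by omega
      rw [hjk]
      have hset : (bs.set (pvKey b i s) (g s (bs.getD (pvKey b i s) d))).getD (pvKey b i s) d
          = g s (bs.getD (pvKey b i s) d) := by
        simp [List.getD_eq_getElem?_getD, List.getElem?_set, hjlen]
      rw [hset]
      have hfil : pvFil b i (s :: t) (pvKey b i s) = s :: pvFil b i t (pvKey b i s) := by
        simp [pvFil]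
      rw [hfil, List.foldl_cons]
    · have hset : (bs.set (pvKey b i s) (g s (bs.getD (pvKey b i s) d))).getD j d = bs.getD j d := by
        simp [List.getD_eq_getElem?_getD, List.getElem?_set, (show pvKey b i s ≠ j by omega)]
      rw [hset]
      have hfil : pvFil b i (s :: t) j = pvFil b i t j := by
        simp only [pvFil, List.filter_cons]
        have : (pvKey b i s == j) = false := by simp [Ne.symm hjk]
        simp [this]
      rw [hfil]

-- A's prefix-sum position loop over range(1, b+1), for an arbitrary count list cnt.
lemma posAux (cnt : List Int) (N : Nat) (hN : 1 ≤ N) :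
    ∀ (t : Nat), 1 ≤ t → t ≤ N →
    (PySem.List.pyRange 1 (t : Int) 1).foldl (fun pa j =>
        PySem.List.pySetD pa j
          (PySem.List.pyGetD pa (j - 1) 0 + PySem.List.pyGetD cnt (j - 1) 0))
      (PySem.List.pySetD (List.replicate N 0) 0 1)
      = (List.range N).map (fun j =>
          if j < t then ((List.range j).map (fun l => cnt.getD l 0)).sum + 1 else 0) := by
  intro t
  induction t with
  | zero => intro h; omega
  | succ t iht =>
    intro _ hle
    by_cases ht0 : t = 0
    · subst ht0
      rw [show ((1 : Nat) : Int) = 1 by norm_num, PySem.List.pyRange_one_eq_nil (by norm_num)]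
      simp only [List.foldl_nil]
      rw [show (0 : Int) = ((0 : Nat) : Int) by norm_num, PySem.List.pySetD_natCast]
      apply List.ext_getElem (by simp)
      intro k hk1 hk2
      simp only [List.getElem_set, List.getElem_map, List.getElem_range, List.getElem_replicate,
        List.length_set, List.length_replicate] at *
      by_cases hk0 : 0 = k
      · subst hk0; simp
      · rw [if_neg hk0, if_neg (by omega)]
    · have ht1 : 1 ≤ t := by omega
      have hcast : ((t + 1 : Nat) : Int) = (t : Int) + 1 := by push_cast; ring
      rw [hcast, PySem.List.pyRange_one_succ_right (by exact_mod_cast ht1), List.foldl_append,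
        iht ht1 (by omega)]
      simp only [List.foldl_cons, List.foldl_nil]
      have hc1 : ((t : Int) - 1) = ((t - 1 : Nat) : Int) := by omega
      rw [hc1, PySem.List.pyGetD_natCast, PySem.List.pyGetD_natCast, PySem.List.pySetD_natCast]
      rw [getD_map_range _ _ _ _ (by omega), if_pos (by omega)]
      apply List.ext_getElem (by simp)
      intro k hk1 hk2
      simp only [List.getElem_set, List.getElem_map, List.getElem_range, List.length_map,
        List.length_range] at *
      by_cases hkt : t = k
      · subst hkt
        rw [if_pos rfl, if_pos (by omega)]
        have : List.range t = List.range (t - 1) ++ [t - 1] := by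
          rw [← List.range_succ]; congr 1; omega
        rw [this]
        simp [List.getD_eq_getElem?_getD]
        ring
      · rw [if_neg hkt]
        by_cases hklt : k < t
        · rw [if_pos hklt, if_pos (by omega)]
        · rw [if_neg hklt, if_neg (by omega)]

-- setting inside a flatten at (sum of earlier block lengths) + off
lemma set_flatten_block {α : Type} :
    ∀ (bss : List (List α)) (k off : Nat) (v : α), (hk : k < bss.length) → off < bss[k].length →
    bss.flatten.set (((List.range k).map (fun l => (bss.getD l []).length)).sum + off) v
      = (bss.set k (bss[k].set off v)).flatten := by
  intro bss
  induction bss with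
  | nil => intro k off v hk; simp at hk
  | cons hd tl ih =>
    intro k off v hk hoff
    cases k with
    | zero =>
      simp only [List.range_zero, List.map_nil, List.sum_nil, Nat.zero_add, List.flatten_cons]
      rw [List.set_append_left _ _ (by simpa using hoff)]
      simp
    | succ k =>
      simp only [List.range_succ_eq_map, List.map_cons, List.sum_cons, List.map_map]
      simp only [List.getD_cons_zero, List.flatten_cons]
      have hsum : ((List.range k).map ((fun l => ((hd :: tl).getD l []).length) ∘ Nat.succ)).sum
          = ((List.range k).map (fun l => (tl.getD l []).length)).sum := by
        congr 1
      rw [List.set_append_right _ _ (by omega)]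
      have harith : hd.length + ((List.range k).map ((fun l => ((hd :: tl).getD l []).length) ∘ Nat.succ)).sum + off - hd.length
          = ((List.range k).map (fun l => (tl.getD l []).length)).sum + off := by
        rw [hsum]; omega
      rw [harith, ih k off v (by simpa using hk) (by simpa using hoff)]
      simp

-- A's placement loop: output as blocks of placed prefixes plus "" placeholders.
lemma loop3 (b i : Int) (hb : 0 ≤ b) :
    ∀ (rem : List String) (ds : List (List String)) (pos : List Int),
    ds.length = (b + 1).toNat → pos.length = (b + 1).toNat →
    (∀ s ∈ rem, -(b + 1) ≤ pvColIndex b i s ∧ pvColIndex b i s < b + 1) →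
    (∀ j, j < (b + 1).toNat →
      pos.getD j 0 = (pvStart b i ds rem j : Int) + (ds.getD j []).length + 1) →
    (rem.foldl (fun st s =>
        let p := PySem.List.pyGetD st.2 (pvColIndex b i s) 0
        (PySem.List.pySetD st.1 (p - 1) s,
         PySem.List.pySetD st.2 (pvColIndex b i s) (p + 1)))
      (pvBlocks b i ds rem, pos)).1
      = ((List.range (b + 1).toNat).map (fun j => ds.getD j [] ++ pvFil b i rem j)).flatten := by
  intro rem
  induction rem with
  | nil =>
    intro ds pos hds _ _ _
    simp only [List.foldl_nil, pvBlocks, pvCnt, List.countP_nil, List.replicate_zero,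
      List.append_nil, pvFil, List.filter_nil, hds]
  | cons s t ih =>
    intro ds pos hds hpos hcol hposval
    obtain ⟨h1, h2⟩ := hcol s (by simp)
    have hbpos : (0 : Int) < b + 1 := by omega
    have hk : pvKey b i s < (b + 1).toNat := key_lt b i s h1 h2
    have hplen : (pos.length : Int) = b + 1 := by rw [hpos]; omega
    simp only [List.foldl_cons]
    rw [pyGetD_wrap pos _ _ (by omega) (by omega)]
    have hwrap : pvWrap pos.length (pvColIndex b i s) = pvKey b i s := by
      unfold pvKey; rw [hpos]
    rw [hwrap, pySetD_wrap pos _ _ (by omega) (by omega), hwrap]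
    rw [hposval _ hk]
    -- the write lands at the first "" of block (pvKey b i s)
    have hcnt1 : pvCnt b i (s :: t) (pvKey b i s) = pvCnt b i t (pvKey b i s) + 1 := by
      simp [pvCnt, List.countP_cons]
    have hcnt2 : ∀ j, j ≠ pvKey b i s → pvCnt b i (s :: t) j = pvCnt b i t j := by
      intro j hj
      simp only [pvCnt, List.countP_cons]
      have : (pvKey b i s == j) = false := by simp [Ne.symm hj]
      simp [this]
    have harith : (pvStart b i ds (s :: t) (pvKey b i s) : Int) + ((ds.getD (pvKey b i s) []).length : Int) + 1 - 1
        = ((pvStart b i ds (s :: t) (pvKey b i s) + (ds.getD (pvKey b i s) []).length : Nat) : Int) := by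
      push_cast; ring
    rw [harith, PySem.List.pySetD_natCast]
    -- rewrite the flatten-set as blocks with s placed
    set ds' := ds.set (pvKey b i s) (ds.getD (pvKey b i s) [] ++ [s]) with hds'
    have hblock : (pvBlocks b i ds (s :: t)).set
        (pvStart b i ds (s :: t) (pvKey b i s) + (ds.getD (pvKey b i s) []).length) s
        = pvBlocks b i ds' t := by
      unfold pvBlocks
      have hlen' : ds'.length = ds.length := by simp [hds']
      have hkd : pvKey b i s < ds.length := by omega
      have hstart : pvStart b i ds (s :: t) (pvKey b i s)
          = ((List.range (pvKey b i s)).map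
              (fun l => ((((List.range ds.length).map
                (fun j => ds.getD j [] ++ List.replicate (pvCnt b i (s :: t) j) "")).getD l []).length))).sum := by
        unfold pvStart
        congr 1
        apply List.map_congr_left
        intro l hl
        simp only [List.mem_range] at hl
        rw [getD_map_range _ _ _ _ (by omega)]
        simp
      rw [hstart,
        set_flatten_block _ (pvKey b i s) _ s (by simpa using hkd)
          (by
            simp only [List.getElem_map, List.getElem_range]
            rw [hcnt1]
            simp)]
      rw [hlen']
      apply congrArg
      apply List.ext_getElem (by simp)
      intro k hk1 hk2
      simp only [List.length_set, List.length_map, List.length_range] at hk1 hk2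
      rw [List.getElem_set]
      by_cases hkk : pvKey b i s = k
      · subst hkk
        rw [if_pos rfl]
        simp only [List.getElem_map, List.getElem_range]
        have hds'k : ds'.getD (pvKey b i s) [] = ds.getD (pvKey b i s) [] ++ [s] := by
          simp [hds', List.getD_eq_getElem?_getD, List.getElem?_set, hkd]
        rw [hds'k, hcnt1]
        rw [List.set_append_right _ _ (le_refl _)]
        simp [List.replicate_succ, List.append_assoc]
      · rw [if_neg hkk]
        simp only [List.getElem_map, List.getElem_range]
        have hds'k : ds'.getD k [] = ds.getD k [] := by
          simp [hds', List.getD_eq_getElem?_getD, List.getElem?_set, hkk]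
        rw [hds'k, hcnt2 _ (fun h : k = pvKey b i s => hkk h.symm)]
    rw [hblock]
    have harith2 : (pvStart b i ds (s :: t) (pvKey b i s) : Int) + ((ds.getD (pvKey b i s) []).length : Int) + 1 + 1
        = (pvStart b i ds' t (pvKey b i s) : Int) + ((ds'.getD (pvKey b i s) []).length : Int) + 1 := by
      have hkd : pvKey b i s < ds.length := by omega
      have hst : pvStart b i ds' t (pvKey b i s) = pvStart b i ds (s :: t) (pvKey b i s) := by
        unfold pvStart
        congr 1
        apply List.map_congr_left
        intro l hl
        simp only [List.mem_range] at hl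
        have : ds'.getD l [] = ds.getD l [] := by
          simp [hds', List.getD_eq_getElem?_getD, List.getElem?_set, (show pvKey b i s ≠ l by omega)]
        rw [this, hcnt2 _ (by omega)]
      have hds'k : ds'.getD (pvKey b i s) [] = ds.getD (pvKey b i s) [] ++ [s] := by
        simp [hds', List.getD_eq_getElem?_getD, List.getElem?_set, hkd]
      rw [hst, hds'k]
      simp
      ring
    rw [harith2]
    rw [ih ds' (pos.set (pvKey b i s) ((pvStart b i ds' t (pvKey b i s) : Int) + ((ds'.getD (pvKey b i s) []).length : Int) + 1))
      (by simp [hds', hds]) (by simp [hpos]) (fun x hx => hcol x (by simp [hx]))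
      (by
        intro j hj
        by_cases hjk : j = pvKey b i s
        · subst hjk
          simp [List.getD_eq_getElem?_getD, List.getElem?_set, show pvKey b i s < pos.length by omega]
        · have hget : ∀ v : Int, (pos.set (pvKey b i s) v).getD j 0 = pos.getD j 0 := fun v => by
            simp [List.getD_eq_getElem?_getD, List.getElem?_set, (show pvKey b i s ≠ j by omega)]
          rw [hget, hposval _ hj]
          have hds'j : ds'.getD j [] = ds.getD j [] := by
            simp [hds', List.getD_eq_getElem?_getD, List.getElem?_set, (show pvKey b i s ≠ j by omega)]
          rw [hds'j]
          have hst : pvStart b i ds' t j = pvStart b i ds (s :: t) j := by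
            unfold pvStart
            congr 1
            apply List.map_congr_left
            intro l hl
            by_cases hlk : l = pvKey b i s
            · subst hlk
              have hkd : pvKey b i s < ds.length := by omega
              have : ds'.getD (pvKey b i s) [] = ds.getD (pvKey b i s) [] ++ [s] := by
                simp [hds', List.getD_eq_getElem?_getD, List.getElem?_set, hkd]
              rw [this, hcnt1]
              simp
              omega
            · have : ds'.getD l [] = ds.getD l [] := by
                simp [hds', List.getD_eq_getElem?_getD, List.getElem?_set, (show pvKey b i s ≠ l by omega)]
              rw [this, hcnt2 _ hlk]
          rw [hst])]
    apply congrArg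
    apply List.map_congr_left
    intro j hj
    simp only [List.mem_range] at hj
    by_cases hjk : j = pvKey b i s
    · subst hjk
      have hkd : pvKey b i s < ds.length := by omega
      have hds'k : ds'.getD (pvKey b i s) [] = ds.getD (pvKey b i s) [] ++ [s] := by
        simp [hds', List.getD_eq_getElem?_getD, List.getElem?_set, hkd]
      have hfil : pvFil b i (s :: t) (pvKey b i s) = s :: pvFil b i t (pvKey b i s) := by
        simp [pvFil]
      rw [hds'k, hfil]
      simp
    · have hds'j : ds'.getD j [] = ds.getD j [] := by
        simp [hds', List.getD_eq_getElem?_getD, List.getElem?_set, (show pvKey b i s ≠ j by omega)]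
      have hfil : pvFil b i (s :: t) j = pvFil b i t j := by
        simp only [pvFil, List.filter_cons]
        have : (pvKey b i s == j) = false := by simp [Ne.symm hjk]
        simp [this]
      rw [hds'j, hfil]

lemma preElem_range (b i : Int) (hb : 0 ≤ b) (s : String) (h : pvPreElem b i s = true) :
    -(b + 1) ≤ pvColIndex b i s ∧ pvColIndex b i s < b + 1 := by
  unfold pvPreElem at h
  unfold pvColIndex
  cases hc : PySem.Str.pyGet? s i with
  | none => rw [hc] at h; simp at h
  | some c =>
    rw [hc] at h
    simp only [Option.getD_some]
    by_cases ha : (c.toNat : Int) - 96 < 0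
    · simp only [ha, if_pos] at h ⊢
      simp only [Bool.and_eq_true, decide_eq_true_eq] at h
      exact h.2
    · simp only [ha, if_false] at h ⊢
      simp only [decide_eq_true_eq] at h
      omega

-- ===== VERDICT (by name: the statement is the Claim_ definition above) =====
theorem counting_sort_stable_str_spec : Claim_equal_counting_sort_stable_str := by
  intro nums b i _ hpre
  obtain ⟨hb, hall⟩ := hpre
  have hcol : ∀ s ∈ nums, -(b + 1) ≤ pvColIndex b i s ∧ pvColIndex b i s < b + 1 :=
    fun s hs => preElem_range b i hb s (hall s hs)
  have hkey : ∀ s ∈ nums, pvKey b i s < (b + 1).toNat :=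
    fun s hs => key_lt b i s (hcol s hs).1 (hcol s hs).2
  -- B's side: buckets, then concatenation
  have hB : counting_sort_stable_str_alt nums b i
      = ((List.range (b + 1).toNat).map (fun j => pvFil b i nums j)).flatten := by
    unfold counting_sort_stable_str_alt
    have h := foldUpd b i (fun s v => v ++ [s]) ([] : List String) nums
      (List.replicate (b + 1).toNat []) (by simp) hcol
    simp only [] at h
    rw [h, PySem.List.foldl_append_eq_flatten, List.nil_append]
    congr 1
    apply List.map_congr_left
    intro j _
    rw [getD_replicate_any, PySem.List.foldl_append_singleton_eq_self, List.nil_append]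
  -- A's side
  have hcnt : nums.foldl (fun ca s =>
        PySem.List.pySetD ca (pvColIndex b i s)
          (PySem.List.pyGetD ca (pvColIndex b i s) 0 + 1))
      (List.replicate (b + 1).toNat 0)
      = (List.range (b + 1).toNat).map (fun j => (pvCnt b i nums j : Int)) := by
    have h := foldUpd b i (fun _ v => v + 1) (0 : Int) nums
      (List.replicate (b + 1).toNat 0) (by simp) hcol
    simp only [] at h
    rw [h]
    apply List.map_congr_left
    intro j _
    rw [getD_replicate_any, PySem.List.foldl_add (g := fun _ => (1 : Int)),
      PySem.List.sum_map_const_int]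
    simp only [pvCnt, pvFil, List.countP_eq_length_filter]
    ring
  have hN1 : 1 ≤ (b + 1).toNat := by omega
  have hpos : (PySem.List.pyRange 1 (b + 1) 1).foldl (fun pa j =>
        PySem.List.pySetD pa j
          (PySem.List.pyGetD pa (j - 1) 0 +
           PySem.List.pyGetD ((List.range (b + 1).toNat).map (fun k => (pvCnt b i nums k : Int))) (j - 1) 0))
      (PySem.List.pySetD (List.replicate (b + 1).toNat 0) 0 1)
      = (List.range (b + 1).toNat).map (fun j =>
          if j < (b + 1).toNat then
            ((List.range j).map (fun l =>
              ((List.range (b + 1).toNat).map (fun k => (pvCnt b i nums k : Int))).getD l 0)).sum + 1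
          else 0) := by
    have h := posAux ((List.range (b + 1).toNat).map (fun k => (pvCnt b i nums k : Int)))
      (b + 1).toNat hN1 (b + 1).toNat (by omega) (le_refl _)
    rw [show (((b + 1).toNat : Nat) : Int) = b + 1 by omega] at h
    exact h
  have hposval : ∀ j, j < (b + 1).toNat →
      ((List.range (b + 1).toNat).map (fun j =>
          if j < (b + 1).toNat then
            ((List.range j).map (fun l =>
              ((List.range (b + 1).toNat).map (fun k => (pvCnt b i nums k : Int))).getD l 0)).sum + 1
          else 0)).getD j 0
      = (pvStart b i (List.replicate (b + 1).toNat ([] : List String)) nums j : Int)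
        + ((List.replicate (b + 1).toNat ([] : List String)).getD j []).length + 1 := by
    intro j hj
    rw [getD_map_range _ _ _ _ hj, if_pos hj, getD_replicate_any]
    have h1 : ∀ l ∈ List.range j,
        ((List.range (b + 1).toNat).map (fun k => (pvCnt b i nums k : Int))).getD l 0
        = ((pvCnt b i nums l : Nat) : Int) := by
      intro l hl
      simp only [List.mem_range] at hl
      rw [getD_map_range _ _ _ _ (by omega)]
    rw [List.map_congr_left h1]
    unfold pvStart
    push_cast
    have h2 : ∀ l ∈ List.range j,
        (((List.replicate (b + 1).toNat ([] : List String)).getD l []).length + pvCnt b i nums l : Nat)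
          = pvCnt b i nums l := by
      intro l _
      rw [getD_replicate_any]
      simp
    rw [List.map_congr_left h2]
    simp [List.map_map, Function.comp_def]
  have hinit : List.replicate nums.length ""
      = pvBlocks b i (List.replicate (b + 1).toNat ([] : List String)) nums := by
    unfold pvBlocks
    have h1 : ∀ j ∈ List.range (List.replicate (b + 1).toNat ([] : List String)).length,
        (List.replicate (b + 1).toNat ([] : List String)).getD j []
          ++ List.replicate (pvCnt b i nums j) ""
        = List.replicate (pvCnt b i nums j) "" := by
      intro j _
      rw [getD_replicate_any, List.nil_append]
    rw [List.map_congr_left h1]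
    simp only [List.length_replicate]
    rw [flatten_map_replicate (pvCnt b i nums) "" (List.range (b + 1).toNat),
      sum_cnt b i nums hkey]
  have hA : counting_sort_stable_str nums b i
      = ((List.range (b + 1).toNat).map (fun j => pvFil b i nums j)).flatten := by
    unfold counting_sort_stable_str
    simp only []
    rw [hcnt, hpos, hinit]
    rw [loop3 b i hb nums (List.replicate (b + 1).toNat []) _ (by simp) (by simp) hcol hposval]
    congr 1
    apply List.map_congr_left
    intro j _
    rw [getD_replicate_any, List.nil_append]
  unfold Spec_counting_sort_stable_str
  rw [hA, hB]
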